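-- pv_equiv track=rewrite | github.com/ShajahanAI/codewars | python/7 kyu/298.py | substring_test
-- ===== SOURCE A (Python) =====
-- def substring_test(s1, s2):
--     s1 = s1.lower()
--     s2 = s2.lower()
--
--     if len(s1) <= 1 or len(s2) <= 1:
--         return False
--
--     smaller_string = s1 if len(s1) < len(s2) else s2
--     larger_string = s2 if smaller_string == s1 else s1
--     all_smallest_substrings = [smaller_string[idx:idx+2] for idx in range(0, len(smaller_string))]
--     for substring in all_smallest_substrings:
--         if len(substring) == 1:
--             continue
--
--         if substring in larger_string:
--             return True
--
--     return False
-- ===== SOURCE B (Python) =====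
-- def substring_test(s1, s2):
--     s1 = s1.lower()
--     s2 = s2.lower()
--     if len(s1) <= 1 or len(s2) <= 1:
--         return False
--     bigrams1 = {s1[i:i+2] for i in range(len(s1) - 1)}
--     bigrams2 = {s2[i:i+2] for i in range(len(s2) - 1)}
--     return bool(bigrams1 & bigrams2)
-- ===== Notes on version B (the rewrite author's own statement) =====
-- stated objective: simpler
-- what changed: Replaces A's smaller/larger string selection, per-pair loop with a length-1 skip branch and early-return substring scan by building both strings' bigram sets once and testing set intersection (a common bigram is symmetric, so the smaller/larger distinction disappears).
import Mathlib
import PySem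

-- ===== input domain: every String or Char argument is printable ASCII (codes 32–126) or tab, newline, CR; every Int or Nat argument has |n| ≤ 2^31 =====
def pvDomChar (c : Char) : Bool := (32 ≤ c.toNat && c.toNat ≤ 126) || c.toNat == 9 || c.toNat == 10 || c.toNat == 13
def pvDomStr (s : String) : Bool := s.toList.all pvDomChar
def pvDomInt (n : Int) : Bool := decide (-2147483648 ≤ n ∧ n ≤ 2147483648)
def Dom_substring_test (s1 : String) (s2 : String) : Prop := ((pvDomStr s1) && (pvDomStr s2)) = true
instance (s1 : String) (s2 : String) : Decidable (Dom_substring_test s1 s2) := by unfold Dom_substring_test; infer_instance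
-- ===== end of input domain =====

-- B replaces A's smaller/larger per-pair loop with early return by a one-shot
-- intersection of the two bigram sets (simpler; same asymptotic cost here).

-- ===== PORT A =====
def substring_test (s1 : String) (s2 : String) : Bool :=
  let t1 := PySem.Str.lower s1
  let t2 := PySem.Str.lower s2
  if PySem.Str.len t1 ≤ 1 ∨ PySem.Str.len t2 ≤ 1 then false
  else
    let smaller := if PySem.Str.len t1 < PySem.Str.len t2 then t1 else t2
    let larger := if smaller == t1 then t2 else t1
    let all_smallest_substrings :=
      (PySem.List.pyRange 0 (PySem.Str.len smaller)).map
        (fun idx => PySem.Str.slice smaller (some idx) (some (idx + 2)))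
    all_smallest_substrings.foldl
      (fun acc sub =>
        if PySem.Str.len sub = 1 then acc
        else if PySem.Str.isIn sub larger then true else acc)
      false

-- ===== PORT B =====
-- {s[i:i+2] for i in range(len(s) - 1)}
def pvBigrams (s : String) : PySem.Set String :=
  PySem.Set.ofList
    ((PySem.List.pyRange 0 (PySem.Str.len s - 1)).map
      (fun i => PySem.Str.slice s (some i) (some (i + 2))))

def substring_test_alt (s1 : String) (s2 : String) : Bool :=
  let t1 := PySem.Str.lower s1
  let t2 := PySem.Str.lower s2
  if PySem.Str.len t1 ≤ 1 ∨ PySem.Str.len t2 ≤ 1 then false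
  else !(PySem.Set.inter (pvBigrams t1) (pvBigrams t2)).isEmpty

-- ===== PRECONDITION & SPEC =====
def Spec_substring_test (s1 : String) (s2 : String) (out : Bool) : Prop := out = substring_test_alt s1 s2
instance (s1 : String) (s2 : String) (out : Bool) : Decidable (Spec_substring_test s1 s2 out) := by unfold Spec_substring_test; infer_instance

-- ===== CLAIM (what is proved, stated in full; the proofs are below) =====
def Claim_equal_substring_test : Prop := ∀ (s1 : String) (s2 : String), Dom_substring_test s1 s2 → Spec_substring_test s1 s2 (substring_test s1 s2)

-- ===== LEMMAS AND PROOFS =====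

-- "l1 and l2 share an adjacent character pair"
def pvHasCommon (l1 l2 : List Char) : Prop :=
  ∃ i j, i + 2 ≤ l1.length ∧ j + 2 ≤ l2.length ∧ (l1.drop i).take 2 = (l2.drop j).take 2

theorem pvHasCommon_comm (l1 l2 : List Char) : pvHasCommon l1 l2 ↔ pvHasCommon l2 l1 := by
  constructor <;> rintro ⟨i, j, hi, hj, h⟩ <;> exact ⟨j, i, hj, hi, h.symm⟩

-- a length-2 substring occurs in l iff it is one of l's bigrams
theorem pvIsIn_two_iff (sub l : List Char) (hs : sub.length = 2) :
    PySem.Chars.isIn sub l = true ↔ ∃ j, j + 2 ≤ l.length ∧ (l.drop j).take 2 = sub := by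
  rw [← PySem.Chars.exists_prefix_drop_iff_isIn]
  constructor
  · rintro ⟨j, hp⟩
    have htake := List.prefix_iff_eq_take.mp hp
    refine ⟨j, ?_, ?_⟩
    · have hlen := hp.length_le
      simp [List.length_drop] at hlen
      omega
    · rw [← hs]; exact htake.symm
  · rintro ⟨j, hj, h⟩
    refine ⟨j, List.prefix_iff_eq_take.mpr ?_⟩
    subst h
    rw [hs]

-- A's loop over smaller's pairs, characterised
theorem pvBg_toList (sm : String) (k : Nat) :
    (PySem.Str.slice sm (some (k:Int)) (some ((k:Int) + 2))).toList = (sm.toList.drop k).take 2 := by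
  rw [PySem.Str.toList_slice, PySem.Chars.slice_eq_listSlice]
  rw [show ((k:Int) + 2) = ((k:Int) + ((2:Nat):Int)) by norm_num, PySem.List.slice_natCast_add]

theorem pvLoopA_iff (sm larg : String) :
    (((PySem.List.pyRange 0 (PySem.Str.len sm)).map
        (fun idx => PySem.Str.slice sm (some idx) (some (idx + 2)))).foldl
      (fun acc sub => if PySem.Str.len sub = 1 then acc
        else if PySem.Str.isIn sub larg then true else acc) false) = true
    ↔ pvHasCommon sm.toList larg.toList := by
  rw [PySem.Str.len_eq, PySem.List.pyRange_zero_natCast, List.map_map, List.foldl_map]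
  simp only [Function.comp_def]
  have hstep : ∀ (acc : Bool), ∀ k ∈ List.range sm.toList.length,
      (if PySem.Str.len (PySem.Str.slice sm (some (k:Int)) (some ((k:Int) + 2))) = 1 then acc
        else if PySem.Str.isIn (PySem.Str.slice sm (some (k:Int)) (some ((k:Int) + 2))) larg then true else acc)
      = (if (!(decide ((((sm.toList.drop k).take 2).length : Int) = 1))
            && PySem.Chars.isIn ((sm.toList.drop k).take 2) larg.toList) then true else acc) := by
    intro acc k hk
    have hb := pvBg_toList sm k
    cases hq : PySem.Chars.isIn ((sm.toList.drop k).take 2) larg.toList <;>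
      by_cases hp : (((sm.toList.drop k).take 2).length : Int) = 1 <;>
        simp [PySem.Str.len_eq, PySem.Str.isIn_eq, hb, hq]
  refine Iff.trans (iff_of_eq (congrArg (fun b => b = true)
      (PySem.List.foldl_congr_mem (List.range sm.toList.length) _
        (fun (acc : Bool) k =>
          if (!(decide ((((sm.toList.drop k).take 2).length : Int) = 1))
              && PySem.Chars.isIn ((sm.toList.drop k).take 2) larg.toList) then true else acc)
        false hstep))) ?_
  rw [PySem.List.foldl_if_true_eq]
  simp only [Bool.false_or, List.any_eq_true, List.mem_range, Bool.and_eq_true,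
    Bool.not_eq_eq_eq_not, Bool.not_true, decide_eq_false_iff_not]
  constructor
  · rintro ⟨k, hk, hne, hin⟩
    have hl : ((sm.toList.drop k).take 2).length = min 2 (sm.toList.length - k) := by
      simp only [List.length_take, List.length_drop]
    have hne' : ((sm.toList.drop k).take 2).length ≠ 1 := by
      intro h; exact hne (by exact_mod_cast congrArg (Nat.cast : Nat → Int) h)
    have hk2 : k + 2 ≤ sm.toList.length := by omega
    have hlen2 : ((sm.toList.drop k).take 2).length = 2 := by omega
    obtain ⟨j, hj, hbg⟩ := (pvIsIn_two_iff _ _ hlen2).mp hin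
    exact ⟨k, j, hk2, hj, hbg.symm⟩
  · rintro ⟨i, j, hi, hj, hbg⟩
    have hlen2 : ((sm.toList.drop i).take 2).length = 2 := by
      simp only [List.length_take, List.length_drop]; omega
    refine ⟨i, by omega, ?_, ?_⟩
    · rw [hlen2]; norm_num
    · exact (pvIsIn_two_iff _ _ hlen2).mpr ⟨j, hj, hbg.symm⟩

-- membership in B's bigram set
theorem pvMem_bigrams (t : String) (x : String) (h2 : 2 ≤ t.toList.length) :
    x ∈ pvBigrams t ↔ ∃ i, i + 2 ≤ t.toList.length ∧ x.toList = (t.toList.drop i).take 2 := by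
  unfold pvBigrams
  rw [PySem.Set.mem_ofList]
  have hcast : PySem.Str.len t - 1 = ((t.toList.length - 1 : Nat) : Int) := by
    rw [PySem.Str.len_eq]; omega
  rw [hcast, PySem.List.pyRange_zero_natCast, List.map_map]
  simp only [List.mem_map, List.mem_range, Function.comp]
  constructor
  · rintro ⟨k, hk, hx⟩
    refine ⟨k, by omega, ?_⟩
    rw [← hx, pvBg_toList]
  · rintro ⟨i, hi, hx⟩
    refine ⟨i, by omega, ?_⟩
    apply String.toList_inj.mp
    rw [pvBg_toList, hx]

-- B's intersection test, characterised
theorem pvInterB_iff (t1 t2 : String) (h1 : 2 ≤ t1.toList.length) (h2 : 2 ≤ t2.toList.length) :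
    (!(PySem.Set.inter (pvBigrams t1) (pvBigrams t2)).isEmpty) = true
    ↔ pvHasCommon t1.toList t2.toList := by
  rw [Bool.not_eq_true', List.isEmpty_eq_false_iff]
  constructor
  · intro h
    obtain ⟨x, hx⟩ := List.exists_mem_of_ne_nil _ h
    simp only [PySem.Set.inter, List.mem_filter, PySem.Set.contains_iff] at hx
    obtain ⟨hx1, hx2⟩ := hx
    obtain ⟨i, hi, he1⟩ := (pvMem_bigrams t1 x h1).mp hx1
    obtain ⟨j, hj, he2⟩ := (pvMem_bigrams t2 x h2).mp hx2
    exact ⟨i, j, hi, hj, by rw [← he1, ← he2]⟩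
  · rintro ⟨i, j, hi, hj, hbg⟩
    apply List.ne_nil_of_mem (a := PySem.Str.slice t1 (some (i:Int)) (some ((i:Int) + 2)))
    simp only [PySem.Set.inter, List.mem_filter, PySem.Set.contains_iff]
    constructor
    · exact (pvMem_bigrams t1 _ h1).mpr ⟨i, hi, by rw [pvBg_toList]⟩
    · exact (pvMem_bigrams t2 _ h2).mpr ⟨j, hj, by rw [pvBg_toList, hbg]⟩

-- ===== VERDICT (by name: the statement is the Claim_ definition above) =====
theorem substring_test_spec : Claim_equal_substring_test := by
  intro s1 s2 _
  unfold Spec_substring_test substring_test substring_test_alt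
  simp only []
  by_cases hg : PySem.Str.len (PySem.Str.lower s1) ≤ 1 ∨ PySem.Str.len (PySem.Str.lower s2) ≤ 1
  · rw [if_pos hg, if_pos hg]
  · rw [if_neg hg, if_neg hg]
    push Not at hg
    obtain ⟨hg1, hg2⟩ := hg
    have e1 := PySem.Str.len_eq (PySem.Str.lower s1)
    have e2 := PySem.Str.len_eq (PySem.Str.lower s2)
    have h1 : 2 ≤ (PySem.Str.lower s1).toList.length := by omega
    have h2 : 2 ≤ (PySem.Str.lower s2).toList.length := by omega
    by_cases hlt : PySem.Str.len (PySem.Str.lower s1) < PySem.Str.len (PySem.Str.lower s2)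
    · rw [if_pos hlt, if_pos (beq_self_eq_true _)]
      exact Bool.coe_iff_coe.mp ((pvLoopA_iff _ _).trans (pvInterB_iff _ _ h1 h2).symm)
    · rw [if_neg hlt]
      by_cases heq : (PySem.Str.lower s2) == (PySem.Str.lower s1)
      · rw [if_pos heq]
        have ht : PySem.Str.lower s2 = PySem.Str.lower s1 := eq_of_beq heq
        rw [ht]
        exact Bool.coe_iff_coe.mp ((pvLoopA_iff _ _).trans (pvInterB_iff _ _ h1 h1).symm)
      · rw [if_neg heq]
        exact Bool.coe_iff_coe.mp ((pvLoopA_iff _ _).trans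
          ((pvHasCommon_comm _ _).trans (pvInterB_iff _ _ h1 h2).symm))
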